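-- pv_equiv track=rewrite | github.com/zakk-h/ConcertBandScores | historical_model.py | standardize_school_name
-- ===== SOURCE A (Python) =====
-- def standardize_school_name(school_name):
--     priority_words = ['symphonic', 'wind', 'concert', '7th', '8th', 'middle', 'high']
--     parts = school_name.lower().split()
--
--     # extract the first word
--     first_word = parts[0]
--
--     # extract the second word if it's not a priority word
--     second_word = parts[1] if len(parts) > 1 and parts[1] not in priority_words else ''
--
--     # find the highest priority word in the name
--     highest_priority_word = ''
--     for word in priority_words:
--         if word in parts:
--             highest_priority_word = word
--             break
--
--     # create the standardized name
--     standardized_name = first_word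
--     if second_word:
--         standardized_name += f" {second_word}"
--     if highest_priority_word:
--         standardized_name += f" {highest_priority_word.capitalize()}"
--
--     return standardized_name
-- ===== SOURCE B (Python) =====
-- def standardize_school_name(school_name):
--     priority_words = ['symphonic', 'wind', 'concert', '7th', '8th', 'middle', 'high']
--     rank = {w: i for i, w in enumerate(priority_words)}
--     parts = school_name.lower().split()
--
--     first_word = parts[0]
--     second_word = parts[1] if len(parts) > 1 and parts[1] not in rank else ''
--
--     # single scan over the name's words, keeping the minimum priority rank seen
--     best = len(priority_words)
--     for w in parts:
--         r = rank.get(w, best)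
--         if r < best:
--             best = r
--
--     pieces = [first_word]
--     if second_word:
--         pieces.append(second_word)
--     if best < len(priority_words):
--         pieces.append(priority_words[best].capitalize())
--     return ' '.join(pieces)
-- ===== Notes on version B (the rewrite author's own statement) =====
-- stated objective: alternative
-- what changed: Replaces the loop over the priority list with an inner membership scan of parts by a precomputed word-to-rank dict and one single pass over the name's words keeping the minimum rank; the result is assembled with ' '.join over a pieces list instead of repeated string concatenation.
-- outside the precondition, e.g. on standardize_school_name(' '): A raises IndexError, B raises IndexError
import Mathlib
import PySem

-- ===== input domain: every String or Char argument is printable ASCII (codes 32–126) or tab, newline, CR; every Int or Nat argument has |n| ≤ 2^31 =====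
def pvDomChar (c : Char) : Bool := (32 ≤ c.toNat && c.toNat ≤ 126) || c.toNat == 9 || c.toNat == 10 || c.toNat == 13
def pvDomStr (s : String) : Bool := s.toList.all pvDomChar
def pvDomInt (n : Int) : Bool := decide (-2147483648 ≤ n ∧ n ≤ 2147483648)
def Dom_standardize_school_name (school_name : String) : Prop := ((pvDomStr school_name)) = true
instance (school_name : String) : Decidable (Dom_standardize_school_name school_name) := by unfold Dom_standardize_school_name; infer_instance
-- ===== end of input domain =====

-- B replaces A's loop over the priority list (with a membership scan of parts inside it) by a
-- precomputed word→rank dict and ONE pass over the name's words keeping the minimum rank, and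
-- assembles the result with ' '.join over a pieces list instead of repeated concatenation.

-- Python str.capitalize() for ASCII strings (not in PySem): upper-case the first character,
-- lower-case the rest — exact on the ASCII domain; both Pythons call this builtin.
def pyCapitalize (s : String) : String :=
  match s.toList with
  | [] => ""
  | c :: rest => String.ofList (PySem.Chars.upperChar c :: PySem.Chars.lower rest)

def pvPriorityWords : List String := ["symphonic", "wind", "concert", "7th", "8th", "middle", "high"]

-- ===== PORT A =====
def standardize_school_name (school_name : String) : String :=
  let priority_words := pvPriorityWords
  let parts := PySem.Str.split₀ (PySem.Str.lower school_name)
  -- parts[0]: Python raises IndexError when parts = []; Pre_ excludes that, the default is never used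
  let first_word := (PySem.List.pyGet? parts 0).getD ""
  -- parts[1] if len(parts) > 1 and parts[1] not in priority_words else ''
  -- (parts[1] is read with pyGet?; the default is never used: the branch requires len(parts) > 1)
  let second_word := if 1 < parts.length ∧ ¬ priority_words.contains ((PySem.List.pyGet? parts 1).getD "") = true
    then (PySem.List.pyGet? parts 1).getD "" else ""
  -- for word in priority_words: if word in parts: highest_priority_word = word; break
  let highest_priority_word := (priority_words.find? (fun w => parts.contains w)).getD ""
  let standardized_name := first_word
  let standardized_name := if second_word ≠ "" then standardized_name ++ " " ++ second_word else standardized_name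
  if highest_priority_word ≠ "" then standardized_name ++ " " ++ pyCapitalize highest_priority_word else standardized_name

-- ===== PORT B =====
-- rank = {w: i for i, w in enumerate(priority_words)}
def pvRank : PySem.Dict String Int :=
  (PySem.List.enumerate pvPriorityWords).foldl (fun d p => d.insert p.2 p.1) PySem.Dict.empty

def standardize_school_name_alt (school_name : String) : String :=
  let rank := pvRank
  let parts := PySem.Str.split₀ (PySem.Str.lower school_name)
  -- parts[0]: Python raises IndexError when parts = []; Pre_ excludes that, the default is never used
  let first_word := (PySem.List.pyGet? parts 0).getD ""
  -- (parts[1] is read with pyGet?; the default is never used: the branch requires len(parts) > 1)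
  let second_word := if 1 < parts.length ∧ ¬ rank.contains ((PySem.List.pyGet? parts 1).getD "") = true
    then (PySem.List.pyGet? parts 1).getD "" else ""
  let n : Int := (pvPriorityWords.length : Int)
  -- for w in parts: r = rank.get(w, best); if r < best: best = r
  let best := parts.foldl (fun b w => let r := rank.getD w b; if r < b then r else b) n
  let pieces := [first_word]
  let pieces := if second_word ≠ "" then pieces ++ [second_word] else pieces
  let pieces := if best < n then pieces ++ [pyCapitalize ((PySem.List.pyGet? pvPriorityWords best).getD "")] else pieces
  PySem.Str.join " " pieces

-- ===== PRECONDITION & SPEC =====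
-- Pre_ excludes only the inputs with no non-whitespace character: there parts = [] and both
-- A and B hit parts[0] and raise IndexError.
def Pre_standardize_school_name (school_name : String) : Prop :=
  PySem.Str.split₀ (PySem.Str.lower school_name) ≠ []
instance (school_name : String) : Decidable (Pre_standardize_school_name school_name) := by
  unfold Pre_standardize_school_name; infer_instance

def pvWitness_standardize_school_name : String := "Jones MIDDLE School"

def Spec_standardize_school_name (school_name : String) (out : String) : Prop :=
  out = standardize_school_name_alt school_name
instance (school_name : String) (out : String) : Decidable (Spec_standardize_school_name school_name out) := by
  unfold Spec_standardize_school_name; infer_instance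

-- ===== CLAIM (what is proved, stated in full; the proofs are below) =====
def Claim_equal_standardize_school_name : Prop := ∀ (school_name : String), Dom_standardize_school_name school_name → Pre_standardize_school_name school_name → Spec_standardize_school_name school_name (standardize_school_name school_name)

-- ===== LEMMAS AND PROOFS =====

-- rank of a word: its index in the priority list, 7 when absent
def pvR (w : String) : Int := pvRank.getD w 7

set_option maxRecDepth 8192 in
theorem pvR_cases (w : String) :
    (pvPriorityWords.contains w = true ∧ pvRank.contains w = true ∧ 0 ≤ pvR w ∧ pvR w < 7 ∧
      (PySem.List.pyGet? pvPriorityWords (pvR w)).getD "" = w ∧ ∀ b, pvRank.getD w b = pvR w)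
    ∨ (pvPriorityWords.contains w = false ∧ pvRank.contains w = false ∧ pvR w = 7 ∧ ∀ b, pvRank.getD w b = b) := by
  by_cases h1 : w = "symphonic"; · subst h1; exact Or.inl ⟨by decide, by decide, by decide, by decide, by decide, fun b => rfl⟩
  by_cases h2 : w = "wind"; · subst h2; exact Or.inl ⟨by decide, by decide, by decide, by decide, by decide, fun b => rfl⟩
  by_cases h3 : w = "concert"; · subst h3; exact Or.inl ⟨by decide, by decide, by decide, by decide, by decide, fun b => rfl⟩
  by_cases h4 : w = "7th"; · subst h4; exact Or.inl ⟨by decide, by decide, by decide, by decide, by decide, fun b => rfl⟩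
  by_cases h5 : w = "8th"; · subst h5; exact Or.inl ⟨by decide, by decide, by decide, by decide, by decide, fun b => rfl⟩
  by_cases h6 : w = "middle"; · subst h6; exact Or.inl ⟨by decide, by decide, by decide, by decide, by decide, fun b => rfl⟩
  by_cases h7 : w = "high"; · subst h7; exact Or.inl ⟨by decide, by decide, by decide, by decide, by decide, fun b => rfl⟩
  right
  have e1 : ("symphonic" == w) = false := beq_eq_false_iff_ne.mpr (fun e => h1 e.symm)
  have e2 : ("wind" == w) = false := beq_eq_false_iff_ne.mpr (fun e => h2 e.symm)
  have e3 : ("concert" == w) = false := beq_eq_false_iff_ne.mpr (fun e => h3 e.symm)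
  have e4 : ("7th" == w) = false := beq_eq_false_iff_ne.mpr (fun e => h4 e.symm)
  have e5 : ("8th" == w) = false := beq_eq_false_iff_ne.mpr (fun e => h5 e.symm)
  have e6 : ("middle" == w) = false := beq_eq_false_iff_ne.mpr (fun e => h6 e.symm)
  have e7 : ("high" == w) = false := beq_eq_false_iff_ne.mpr (fun e => h7 e.symm)
  refine ⟨?_, ?_, ?_, fun b => ?_⟩ <;>
    simp [pvR, pvRank, pvPriorityWords, PySem.Dict.getD, PySem.Dict.get?, PySem.Dict.contains,
      PySem.Dict.empty, PySem.Dict.insert, PySem.List.enumerate,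
      e1,e2,e3,e4,e5,e6,e7] <;> exact ⟨h1,h2,h3,h4,h5,h6,h7⟩

theorem pvContains_eq (w : String) : pvRank.contains w = pvPriorityWords.contains w := by
  rcases pvR_cases w with ⟨h1, h2, _⟩ | ⟨h1, h2, _⟩ <;> rw [h1, h2]

theorem pvR_idx (j : Nat) (hj : j < pvPriorityWords.length) : pvR (pvPriorityWords[j]) = (j : Int) := by
  simp only [pvPriorityWords, List.length_cons, List.length_nil] at hj
  interval_cases j <;> simp [pvPriorityWords] <;> decide

-- B's fold equals the plain min-rank fold
theorem pvFold_eq (l : List String) (b : Int) (hb : b ≤ 7) :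
    l.foldl (fun b w => let r := pvRank.getD w b; if r < b then r else b) b
      = l.foldl (fun b w => min b (pvR w)) b := by
  induction l generalizing b with
  | nil => rfl
  | cons w l ih =>
    have hstep : (let r := pvRank.getD w b; if r < b then r else b) = min b (pvR w) := by
      rcases pvR_cases w with ⟨_, _, _, _, _, hgd⟩ | ⟨_, _, hR, hgd⟩ <;>
        simp only [hgd, min_def] <;> split_ifs <;> omega
    rw [List.foldl_cons, List.foldl_cons, hstep]
    exact ih _ (le_trans (min_le_left _ _) hb)

theorem pvMinFold_le (l : List String) (b : Int) :
    l.foldl (fun b w => min b (pvR w)) b ≤ b := by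
  induction l generalizing b with
  | nil => simp
  | cons w l ih => exact le_trans (ih _) (min_le_left _ _)

theorem pvMinFold_le_mem (l : List String) : ∀ (b : Int) (w : String), w ∈ l →
    l.foldl (fun b w => min b (pvR w)) b ≤ pvR w := by
  induction l with
  | nil => intro _ _ hw; cases hw
  | cons x l ih =>
    intro b w hw
    rw [List.foldl_cons]
    rcases List.mem_cons.mp hw with rfl | hw
    · exact le_trans (pvMinFold_le _ _) (min_le_right _ _)
    · exact ih _ _ hw

theorem pvMinFold_attain (l : List String) (b : Int) :
    l.foldl (fun b w => min b (pvR w)) b = b ∨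
      ∃ w ∈ l, l.foldl (fun b w => min b (pvR w)) b = pvR w := by
  induction l generalizing b with
  | nil => exact Or.inl rfl
  | cons x l ih =>
    rcases ih (min b (pvR x)) with h | ⟨w, hw, h⟩
    · rw [List.foldl_cons, h]
      rcases min_cases b (pvR x) with ⟨h', _⟩ | ⟨h', _⟩
      · exact Or.inl h'
      · exact Or.inr ⟨x, List.mem_cons_self, h'⟩
    · exact Or.inr ⟨w, List.mem_cons_of_mem _ hw, h⟩

-- the minimum rank found by B names exactly the word A's break-loop finds
theorem pvFind_of_lt (parts : List String)
    (h : parts.foldl (fun b w => min b (pvR w)) 7 < 7) :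
    pvPriorityWords.find? (fun w => parts.contains w)
      = some ((PySem.List.pyGet? pvPriorityWords (parts.foldl (fun b w => min b (pvR w)) 7)).getD "") := by
  rcases pvMinFold_attain parts 7 with hm | ⟨w, hw, hm⟩
  · omega
  rcases pvR_cases w with ⟨hc, _, h0, h7, hget, _⟩ | ⟨_, _, hR, _⟩
  · rw [hm, hget]
    have hmin_le : ∀ v ∈ parts, pvR w ≤ pvR v := by
      intro v hv; rw [← hm]; exact pvMinFold_le_mem _ _ _ hv
    refine List.find?_eq_some_iff_getElem.mpr ⟨by simpa using hw, (pvR w).toNat, ?_, ?_, ?_⟩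
    · show (pvR w).toNat < pvPriorityWords.length; simp [pvPriorityWords]; omega
    · have := pvR_idx (pvR w).toNat (by simp [pvPriorityWords]; omega)
      have hcast : ((pvR w).toNat : Int) = pvR w := Int.toNat_of_nonneg h0
      rw [hcast] at this
      -- pvPriorityWords[(pvR w).toNat] has rank pvR w; by hget it must be w
      rcases pvR_cases (pvPriorityWords[(pvR w).toNat]'(by simp [pvPriorityWords]; omega)) with
        ⟨_, _, _, _, hget', _⟩ | ⟨_, _, hR', _⟩
      · rw [this] at hget'
        rw [← hget']; exact hget
      · rw [this] at hR'; omega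
    · intro j hj
      have hjlen : j < pvPriorityWords.length := by simp [pvPriorityWords]; omega
      have hRj := pvR_idx j hjlen
      simp only [Bool.not_eq_true']
      rw [List.contains_eq_mem]
      simp only [decide_eq_false_iff_not]
      intro hmem
      have hle := hmin_le _ hmem
      rw [hRj] at hle
      omega
  · rw [hm, hR] at h; omega

theorem pvFind_of_ge (parts : List String)
    (h : ¬ parts.foldl (fun b w => min b (pvR w)) 7 < 7) :
    pvPriorityWords.find? (fun w => parts.contains w) = none := by
  have hle := pvMinFold_le parts 7
  refine List.find?_eq_none.mpr ?_
  intro x hx hcon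
  have hxp : x ∈ parts := by simpa using hcon
  have := pvMinFold_le_mem parts 7 x hxp
  rcases pvR_cases x with ⟨_, _, _, h7, _, _⟩ | ⟨hc, _, _, _⟩
  · omega
  · rw [List.contains_eq_mem] at hc; simp [hx] at hc

-- the word B recovers from the minimum rank is a priority word (hence nonempty)
theorem pvVal_mem (parts : List String)
    (h : parts.foldl (fun b w => min b (pvR w)) 7 < 7) :
    ((PySem.List.pyGet? pvPriorityWords (parts.foldl (fun b w => min b (pvR w)) 7)).getD "")
      ∈ pvPriorityWords := by
  rcases pvMinFold_attain parts 7 with hm | ⟨w, hw, hm⟩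
  · omega
  rcases pvR_cases w with ⟨hc, _, _, _, hget, _⟩ | ⟨_, _, hR, _⟩
  · rw [hm, hget]
    rw [List.contains_eq_mem] at hc
    exact of_decide_eq_true hc
  · rw [hm, hR] at h; omega

-- join lemmas
theorem pvJoin1 (a : String) : PySem.Str.join " " [a] = a := by
  refine String.toList_inj.mp ?_
  simp [PySem.Str.join, PySem.Chars.join, List.intercalate]
theorem pvJoin2 (a b : String) : PySem.Str.join " " [a, b] = a ++ " " ++ b := by
  refine String.toList_inj.mp ?_
  simp [PySem.Str.join, PySem.Chars.join, List.intercalate, String.toList_append]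
theorem pvJoin3 (a b c : String) : PySem.Str.join " " [a, b, c] = a ++ " " ++ b ++ " " ++ c := by
  refine String.toList_inj.mp ?_
  simp [PySem.Str.join, PySem.Chars.join, List.intercalate, String.toList_append]

-- ===== VERDICT (by name: the statement is the Claim_ definition above) =====
theorem standardize_school_name_spec : Claim_equal_standardize_school_name := by
  intro s _ hpre
  unfold Pre_standardize_school_name at hpre
  unfold Spec_standardize_school_name standardize_school_name standardize_school_name_alt
  have hn : ((pvPriorityWords.length : Nat) : Int) = 7 := by norm_num [pvPriorityWords]
  simp only [hn]
  rw [pvFold_eq _ 7 (le_refl 7)]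
  generalize hP : PySem.Str.split₀ (PySem.Str.lower s) = parts at hpre ⊢
  obtain ⟨p0, rest, rfl⟩ := List.exists_cons_of_ne_nil hpre
  have hfw : PySem.List.pyGet? (p0 :: rest) (0 : Int) = some p0 := by
    simp [PySem.List.pyGet?, PySem.List.pyIdx?]
  rw [hfw]
  have hg1 : ∀ (p1 : String) (l : List String), PySem.List.pyGet? (p0 :: p1 :: l) (1 : Int) = some p1 := by
    intro p1 l; simp [PySem.List.pyGet?, PySem.List.pyIdx?]
  by_cases hlt : (p0 :: rest).foldl (fun b w => min b (pvR w)) 7 < 7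
  · rw [pvFind_of_lt _ hlt]
    have hvne : (PySem.List.pyGet? pvPriorityWords
        ((p0 :: rest).foldl (fun b w => min b (pvR w)) 7)).getD "" ≠ "" := by
      intro h
      have := pvVal_mem _ hlt
      rw [h] at this
      exact absurd this (by decide)
    rcases rest with _ | ⟨p1, rest'⟩
    · simp only [List.foldl_cons, List.foldl_nil] at hlt hvne
      simp [hlt, hvne, pvJoin2]
    · rw [hg1]
      simp only [List.foldl_cons, min_assoc] at hlt hvne
      by_cases hc : p1 ∈ pvPriorityWords
      · simp [hlt, hvne, hc, pvContains_eq, pvJoin2]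
      · by_cases hp1 : p1 = ""
        · subst hp1; simp [hlt, hvne, hc, pvContains_eq, pvJoin2]
        · simp [hlt, hvne, hc, hp1, pvContains_eq, pvJoin3]
  · rw [pvFind_of_ge _ hlt]
    rcases rest with _ | ⟨p1, rest'⟩
    · simp only [List.foldl_cons, List.foldl_nil] at hlt
      simp [hlt, pvJoin1]
    · rw [hg1]
      simp only [List.foldl_cons, min_assoc] at hlt
      by_cases hc : p1 ∈ pvPriorityWords
      · simp [hlt, hc, pvContains_eq, pvJoin1]
      · by_cases hp1 : p1 = ""
        · subst hp1; simp [hlt, hc, pvContains_eq, pvJoin1]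
        · simp [hlt, hc, hp1, pvContains_eq, pvJoin2]
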